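-- pv_equiv track=rewrite | github.com/maxwell-dantas/Prog-Computadores | Codeforces/Lista 10/E.py | sequencia_saltadora
-- ===== SOURCE A (Python) =====
-- def sequencia_saltadora(sequencia:list) -> bool:
--   sequencia_bool = True
--   valor_n = sequencia[0]
--   lista_validacao = []
--
--   if valor_n == 1:
--     return sequencia_bool
--
--   for i in range(2, len(sequencia)):
--     diferenca = abs(sequencia[i] - sequencia[i - 1])
--     if diferenca < 1 or diferenca > valor_n - 1:
--       sequencia_bool = False
--       break
--     else:
--       if diferenca not in lista_validacao:
--         lista_validacao.append(diferenca)
--       else: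
--         sequencia_bool = False
--         break
--
--   return sequencia_bool
-- ===== SOURCE B (Python) =====
-- def sequencia_saltadora(sequencia: list) -> bool:
--     valor_n = sequencia[0]
--     if valor_n == 1:
--         return True
--     s = sorted(abs(sequencia[i] - sequencia[i - 1]) for i in range(2, len(sequencia)))
--     if not s:
--         return True
--     if s[0] < 1 or s[-1] > valor_n - 1:
--         return False
--     return all(a < b for a, b in zip(s, s[1:]))
-- ===== Notes on version B (the rewrite author's own statement) =====
-- stated objective: alternative
-- what changed: Sort-then-scan instead of a break-loop with a maintained seen-list: B sorts the consecutive absolute diffs (same range bounds, skipping the first pair as A does), checks the range via the sorted list's first and last elements, and checks distinctness by a single adjacent-pairs strict-increase scan over the sorted list.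
-- outside the precondition, e.g. on sequencia_saltadora([]): A raises IndexError, B raises IndexError
import Mathlib
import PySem

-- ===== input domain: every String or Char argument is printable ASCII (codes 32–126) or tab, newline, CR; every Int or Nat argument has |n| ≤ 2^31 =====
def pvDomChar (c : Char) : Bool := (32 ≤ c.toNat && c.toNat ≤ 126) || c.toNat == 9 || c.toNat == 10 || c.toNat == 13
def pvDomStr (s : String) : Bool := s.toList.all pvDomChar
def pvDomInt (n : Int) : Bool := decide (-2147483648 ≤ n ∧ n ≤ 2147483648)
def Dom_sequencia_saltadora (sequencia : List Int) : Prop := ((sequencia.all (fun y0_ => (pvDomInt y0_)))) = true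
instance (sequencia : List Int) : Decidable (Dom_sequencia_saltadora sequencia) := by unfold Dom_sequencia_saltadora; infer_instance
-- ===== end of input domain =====

-- B replaces A's break-loop with a maintained seen-list by sort-then-scan over the same diffs
-- (range check via the sorted endpoints, distinctness via one adjacent-pairs scan); objective: alternative.

-- ===== PORT A =====
-- the 'for i in range(2, len(sequencia))' loop with its break, carrying lista_validacao
def pvALoop (sequencia : List Int) (valor_n : Int) (lista : List Int) : List Int → Bool
  | [] => true
  | i :: rest =>
    let diferenca := |PySem.List.pyGetD sequencia i 0 - PySem.List.pyGetD sequencia (i - 1) 0|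
    if diferenca < 1 ∨ diferenca > valor_n - 1 then false
    else if diferenca ∈ lista then false
    else pvALoop sequencia valor_n (lista ++ [diferenca]) rest

def sequencia_saltadora (sequencia : List Int) : Bool :=
  -- first-element access: exact under Pre_ (list nonempty); Python raises IndexError on the empty list
  let valor_n := PySem.List.pyGetD sequencia 0 0
  if valor_n = 1 then true
  else pvALoop sequencia valor_n [] (PySem.List.pyRange 2 (sequencia.length : Int) 1)

-- ===== PORT B =====
def sequencia_saltadora_alt (sequencia : List Int) : Bool :=
  -- first-element access: exact under Pre_ (list nonempty); Python raises IndexError on the empty list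
  let valor_n := PySem.List.pyGetD sequencia 0 0
  if valor_n = 1 then true
  else
    let s := PySem.List.sorted ((PySem.List.pyRange 2 (sequencia.length : Int) 1).map
        (fun i => |PySem.List.pyGetD sequencia i 0 - PySem.List.pyGetD sequencia (i - 1) 0|))
        (fun x => x) false
    if s = [] then true
    else if PySem.List.pyGetD s 0 0 < 1 ∨ PySem.List.pyGetD s (-1) 0 > valor_n - 1 then false
    else (s.zip (PySem.List.slice s (some 1) none)).all (fun p => decide (p.1 < p.2))

-- ===== PRECONDITION & SPEC =====
-- Pre_ excludes only the empty list, on which Python A (and B) raise IndexError at the first-element access.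
def Pre_sequencia_saltadora (sequencia : List Int) : Prop := sequencia ≠ []
instance (sequencia : List Int) : Decidable (Pre_sequencia_saltadora sequencia) := by
  unfold Pre_sequencia_saltadora; infer_instance
def pvWitness_sequencia_saltadora : List Int := [3, 1, 2]

def Spec_sequencia_saltadora (sequencia : List Int) (out : Bool) : Prop := out = sequencia_saltadora_alt sequencia
instance (sequencia : List Int) (out : Bool) : Decidable (Spec_sequencia_saltadora sequencia out) := by unfold Spec_sequencia_saltadora; infer_instance

-- ===== CLAIM (what is proved, stated in full; the proofs are below) =====
def Claim_equal_sequencia_saltadora : Prop := ∀ (sequencia : List Int), Dom_sequencia_saltadora sequencia → Pre_sequencia_saltadora sequencia → Spec_sequencia_saltadora sequencia (sequencia_saltadora sequencia)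

-- ===== LEMMAS AND PROOFS =====

-- A's loop returns true iff every diff is in range, the diffs are pairwise distinct,
-- and none of them already occurs in lista_validacao.
theorem pvALoop_eq (sequencia : List Int) (valor_n : Int) :
    ∀ (is lista : List Int),
      pvALoop sequencia valor_n lista is =
        (((is.map (fun i => |PySem.List.pyGetD sequencia i 0 - PySem.List.pyGetD sequencia (i - 1) 0|)).all
            (fun d => decide (1 ≤ d ∧ d ≤ valor_n - 1))) &&
          decide ((is.map (fun i => |PySem.List.pyGetD sequencia i 0 - PySem.List.pyGetD sequencia (i - 1) 0|)).Nodup ∧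
            ∀ d ∈ is.map (fun i => |PySem.List.pyGetD sequencia i 0 - PySem.List.pyGetD sequencia (i - 1) 0|), d ∉ lista)) := by
  intro is
  induction is with
  | nil => intro lista; simp [pvALoop]
  | cons i rest ih =>
    intro lista
    simp only [pvALoop, List.map_cons, List.all_cons]
    by_cases h1 : |PySem.List.pyGetD sequencia i 0 - PySem.List.pyGetD sequencia (i - 1) 0| < 1 ∨ |PySem.List.pyGetD sequencia i 0 - PySem.List.pyGetD sequencia (i - 1) 0| > valor_n - 1
    · rw [if_pos h1]
      have hpd : decide (1 ≤ |PySem.List.pyGetD sequencia i 0 - PySem.List.pyGetD sequencia (i - 1) 0| ∧ |PySem.List.pyGetD sequencia i 0 - PySem.List.pyGetD sequencia (i - 1) 0| ≤ valor_n - 1) = false := by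
        rw [decide_eq_false_iff_not]; omega
      rw [hpd, Bool.false_and, Bool.false_and]
    · rw [if_neg h1]
      have hpd : decide (1 ≤ |PySem.List.pyGetD sequencia i 0 - PySem.List.pyGetD sequencia (i - 1) 0| ∧ |PySem.List.pyGetD sequencia i 0 - PySem.List.pyGetD sequencia (i - 1) 0| ≤ valor_n - 1) = true := by
        rw [decide_eq_true_eq]; omega
      rw [hpd, Bool.true_and]
      by_cases h2 : |PySem.List.pyGetD sequencia i 0 - PySem.List.pyGetD sequencia (i - 1) 0| ∈ lista
      · rw [if_pos h2]
        have hP : ¬((|PySem.List.pyGetD sequencia i 0 - PySem.List.pyGetD sequencia (i - 1) 0| :: rest.map (fun i => |PySem.List.pyGetD sequencia i 0 - PySem.List.pyGetD sequencia (i - 1) 0|)).Nodup ∧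
            ∀ x ∈ |PySem.List.pyGetD sequencia i 0 - PySem.List.pyGetD sequencia (i - 1) 0| :: rest.map (fun i => |PySem.List.pyGetD sequencia i 0 - PySem.List.pyGetD sequencia (i - 1) 0|), x ∉ lista) := by
          rintro ⟨-, hall⟩
          exact hall _ List.mem_cons_self h2
        symm
        rw [Bool.eq_false_iff]
        intro hcon
        rw [Bool.and_eq_true] at hcon
        exact hP (of_decide_eq_true hcon.2)
      · rw [if_neg h2, ih]
        congr 1
        rw [decide_eq_decide]
        constructor
        · rintro ⟨hnd, hall⟩
          refine ⟨List.nodup_cons.mpr ⟨fun hm => hall _ hm (List.mem_append_right _ (List.mem_singleton_self _)), hnd⟩, ?_⟩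
          intro x hx
          rcases List.mem_cons.mp hx with rfl | hx'
          · exact h2
          · exact fun hl => hall x hx' (List.mem_append_left _ hl)
        · rintro ⟨hnd, hall⟩
          obtain ⟨hni, hnd'⟩ := List.nodup_cons.mp hnd
          refine ⟨hnd', fun x hx hmem => ?_⟩
          rcases List.mem_append.mp hmem with hl | hr
          · exact hall x (List.mem_cons_of_mem _ hx) hl
          · rw [List.mem_singleton.mp hr] at hx
            exact hni hx

-- over a ≤-sorted list, the adjacent-pairs strict scan decides pairwise strictness
theorem zip_tail_all_sorted (s : List Int) (h : s.Pairwise (· ≤ ·)) :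
    (s.zip s.tail).all (fun p => decide (p.1 < p.2)) = decide (s.Pairwise (· < ·)) := by
  induction s with
  | nil => simp
  | cons a t ih =>
    rcases List.pairwise_cons.mp h with ⟨ha, ht⟩
    cases t with
    | nil => simp
    | cons b u =>
      have ihr := ih ht
      simp only [List.tail_cons] at ihr
      simp only [List.tail_cons, List.zip_cons_cons, List.all_cons, ihr]
      rw [Bool.eq_iff_iff]
      simp only [Bool.and_eq_true, decide_eq_true_eq]
      constructor
      · rintro ⟨hab, hpw⟩
        refine List.pairwise_cons.mpr ⟨?_, hpw⟩
        intro y hy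
        rcases List.mem_cons.mp hy with rfl | hy'
        · exact hab
        · exact lt_of_lt_of_le hab ((List.pairwise_cons.mp ht).1 y hy')
      · intro hpw
        rcases List.pairwise_cons.mp hpw with ⟨hlt, hpw'⟩
        exact ⟨hlt b List.mem_cons_self, hpw'⟩

-- in a ≤-sorted list, every element is ≤ the last
theorem le_getLast_of_pairwise_le (s : List Int) (h : s.Pairwise (· ≤ ·)) (hs : s ≠ []) :
    ∀ y ∈ s, y ≤ s.getLast hs := by
  induction s with
  | nil => exact absurd rfl hs
  | cons a t ih =>
    intro y hy
    rcases List.pairwise_cons.mp h with ⟨ha, ht⟩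
    cases t with
    | nil => simp at hy; simp [hy, List.getLast]
    | cons b u =>
      rw [List.getLast_cons (by simp)]
      rcases List.mem_cons.mp hy with rfl | hy'
      · exact le_trans (ha _ (List.getLast_mem _)) (le_refl _)
      · exact ih ht (by simp) y hy'

-- ===== VERDICT (by name: the statement is the Claim_ definition above) =====
theorem sequencia_saltadora_spec : Claim_equal_sequencia_saltadora := by
  intro sequencia _ _
  show sequencia_saltadora sequencia = sequencia_saltadora_alt sequencia
  by_cases h1 : PySem.List.pyGetD sequencia 0 0 = 1
  · simp [sequencia_saltadora, sequencia_saltadora_alt, h1]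
  · simp only [sequencia_saltadora, sequencia_saltadora_alt, if_neg h1]
    rw [pvALoop_eq]
    set n := PySem.List.pyGetD sequencia 0 0 with hn
    set diffs := (PySem.List.pyRange 2 (sequencia.length : Int) 1).map
      (fun i => |PySem.List.pyGetD sequencia i 0 - PySem.List.pyGetD sequencia (i - 1) 0|) with hdiffs
    set s := PySem.List.sorted diffs (fun x => x) false with hs
    have hperm : s.Perm diffs := PySem.List.sorted_perm diffs (fun x => x) false
    have hpw : s.Pairwise (· ≤ ·) := by
      have := PySem.List.sorted_pairwise diffs (fun x => x)
      simpa using this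
    by_cases hnil : s = []
    · have hd : diffs = [] := by
        have := hperm; rw [hnil] at this; exact (List.Perm.nil_eq this).symm
      simp [hnil, hd]
    · rw [if_neg hnil]
      rw [PySem.List.slice_from_one, zip_tail_all_sorted s hpw]
      have hlast : PySem.List.pyGetD s (-1) 0 = s.getLast hnil :=
        PySem.List.pyGetD_neg_one s 0 hnil
      obtain ⟨m, t, hmt⟩ := List.exists_cons_of_ne_nil hnil
      have hhead : PySem.List.pyGetD s 0 0 = m := by rw [hmt]; exact PySem.List.pyGetD_zero_cons m t 0
      have hmin : ∀ y ∈ diffs, m ≤ y := by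
        intro y hy
        have := PySem.List.key_head_sorted_le (xs := diffs) (key := fun x => x) (hs.symm.trans hmt) y hy
        simpa using this
      have hmax : ∀ y ∈ diffs, y ≤ s.getLast hnil := by
        intro y hy
        exact le_getLast_of_pairwise_le s hpw hnil y (hperm.mem_iff.mpr hy)
      by_cases hbad : PySem.List.pyGetD s 0 0 < 1 ∨ PySem.List.pyGetD s (-1) 0 > n - 1
      · rw [if_pos hbad]
        -- some diff is out of range: the all-check fails
        have hm_mem : m ∈ diffs := hperm.mem_iff.mp (hmt ▸ List.mem_cons_self)
        have hl_mem : s.getLast hnil ∈ diffs := hperm.mem_iff.mp (List.getLast_mem hnil)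
        have : diffs.all (fun d => decide (1 ≤ d ∧ d ≤ n - 1)) = false := by
          rw [List.all_eq_false]
          rcases hbad with hb | hb
          · exact ⟨m, hm_mem, by rw [hhead] at hb; simp; omega⟩
          · exact ⟨s.getLast hnil, hl_mem, by rw [hlast] at hb; simp; omega⟩
        rw [this, Bool.false_and]
      · rw [if_neg hbad]
        push Not at hbad
        rw [hhead, hlast] at hbad
        have hall : diffs.all (fun d => decide (1 ≤ d ∧ d ≤ n - 1)) = true := by
          rw [List.all_eq_true]
          intro d hd
          have := hmin d hd
          have := hmax d hd
          simp; omega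
        rw [hall, Bool.true_and]
        -- distinctness: Nodup diffs ↔ Chain' (<) s
        rw [decide_eq_decide]
        constructor
        · rintro ⟨hnd, -⟩
          have hnds : s.Nodup := (hperm.nodup_iff).mpr hnd
          have := hpw.and hnds
          exact this.imp (fun {a b} h => lt_of_le_of_ne h.1 h.2)
        · intro hpwlt
          have hnds : s.Nodup := hpwlt.imp (fun {a b} h => ne_of_lt h)
          exact ⟨hperm.nodup_iff.mp hnds, by simp⟩
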